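-- pv_equiv track=rewrite | github.com/reusmakrix/101Internet_test | pag/pag_strings.py | gn
-- ===== SOURCE A (Python) =====
-- def gn(text):
-- 	result=''
-- 	dd = ['.','1','2','3','4','5','6','7','8','9','0']
-- 	for l in text:
-- 		for d in dd:
-- 			if l== d:
-- 				result+=l
-- 	return result
-- ===== SOURCE B (Python) =====
-- import re
--
-- _KEEP = re.compile(r'[^0-9.]')
--
-- def gn(text):
--     return _KEEP.sub('', text)
-- ===== Notes on version B (the rewrite author's own statement) =====
-- stated objective: idiomatic
-- what changed: Replaces A's nested per-character loop over an 11-element candidate list with a single precompiled regex substitution deleting every character outside the class [0-9.].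
import Mathlib
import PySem

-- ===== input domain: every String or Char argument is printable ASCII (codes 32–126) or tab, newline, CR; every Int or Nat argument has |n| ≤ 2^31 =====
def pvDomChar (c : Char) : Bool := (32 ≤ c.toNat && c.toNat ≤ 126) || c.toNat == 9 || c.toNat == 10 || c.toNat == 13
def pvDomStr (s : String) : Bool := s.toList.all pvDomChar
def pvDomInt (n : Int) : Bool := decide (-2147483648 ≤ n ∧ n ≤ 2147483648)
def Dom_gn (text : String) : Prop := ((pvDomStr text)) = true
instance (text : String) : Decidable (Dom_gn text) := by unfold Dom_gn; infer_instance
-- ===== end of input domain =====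

-- B replaces A's nested per-character comparison loop with a single regex-style
-- character-class filter keeping only [0-9.] (idiomatic, one pass).

-- ===== PORT A =====
-- A: for each char l of text, scan dd = ['.','1',...,'0'] and append l on a match.
def gn (text : String) : String :=
  let dd : List Char := ['.', '1', '2', '3', '4', '5', '6', '7', '8', '9', '0']
  String.mk (text.toList.foldl
    (fun result l => dd.foldl (fun r d => if l = d then r ++ [l] else r) result) [])

-- ===== PORT B =====
-- B: re.sub(r'[^0-9.]', '', text) — one pass deleting chars outside the class [0-9.];
-- ported as a single filter with that character-class predicate.
def gnKeep (c : Char) : Bool := ('0' ≤ c && c ≤ '9') || c == '.'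

def gn_alt (text : String) : String :=
  String.mk (text.toList.filter gnKeep)

-- ===== PRECONDITION & SPEC =====
def Spec_gn (text : String) (out : String) : Prop := out = gn_alt text
instance (text : String) (out : String) : Decidable (Spec_gn text out) := by unfold Spec_gn; infer_instance

-- ===== CLAIM (what is proved, stated in full; the proofs are below) =====
def Claim_equal_gn : Prop := ∀ (text : String), Dom_gn text → Spec_gn text (gn text)

-- ===== LEMMAS AND PROOFS =====
lemma gn_fold_not_mem (l : Char) (dd : List Char) (r : List Char) (h : l ∉ dd) :
    dd.foldl (fun r d => if l = d then r ++ [l] else r) r = r := by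
  induction dd generalizing r with
  | nil => rfl
  | cons d dd ih =>
      simp only [List.mem_cons, not_or] at h
      simp only [List.foldl, if_neg h.1]
      exact ih r h.2

lemma gn_fold_mem (l : Char) (dd : List Char) (r : List Char) (h : l ∈ dd) (hnd : dd.Nodup) :
    dd.foldl (fun r d => if l = d then r ++ [l] else r) r = r ++ [l] := by
  induction dd generalizing r with
  | nil => cases h
  | cons d dd ih =>
      rcases List.nodup_cons.mp hnd with ⟨hd, hnd'⟩
      by_cases he : l = d
      · subst he
        simp only [List.foldl, reduceIte]
        exact gn_fold_not_mem l dd (r ++ [l]) hd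
      · simp only [List.foldl, if_neg he]
        exact ih r ((List.mem_cons.mp h).resolve_left he) hnd'

lemma gn_inner (r : List Char) (l : Char) :
    (['.', '1', '2', '3', '4', '5', '6', '7', '8', '9', '0'] : List Char).foldl
      (fun r d => if l = d then r ++ [l] else r) r
    = r ++ (if gnKeep l then [l] else []) := by
  have hmem : gnKeep l = true ↔ l ∈ (['.', '1', '2', '3', '4', '5', '6', '7', '8', '9', '0'] : List Char) := by
    simp only [gnKeep, List.mem_cons, List.not_mem_nil, or_false, Char.ext_iff,
      Bool.or_eq_true, Bool.and_eq_true, decide_eq_true_eq, beq_iff_eq, Char.le_def,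
      UInt32.le_iff_toNat_le, UInt32.ext_iff,
      show ('0').val.toNat = 48 from rfl, show ('1').val.toNat = 49 from rfl,
      show ('2').val.toNat = 50 from rfl, show ('3').val.toNat = 51 from rfl,
      show ('4').val.toNat = 52 from rfl, show ('5').val.toNat = 53 from rfl,
      show ('6').val.toNat = 54 from rfl, show ('7').val.toNat = 55 from rfl,
      show ('8').val.toNat = 56 from rfl, show ('9').val.toNat = 57 from rfl,
      show ('.').val.toNat = 46 from rfl]
    omega
  by_cases h : gnKeep l = true
  · rw [if_pos h]
    exact gn_fold_mem l _ r (hmem.mp h) (by decide)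
  · rw [if_neg (by simpa using h), List.append_nil]
    exact gn_fold_not_mem l _ r (fun hm => h (hmem.mpr hm))

lemma gn_outer (cs : List Char) (r : List Char) :
    cs.foldl (fun result l =>
        (['.', '1', '2', '3', '4', '5', '6', '7', '8', '9', '0'] : List Char).foldl
          (fun r d => if l = d then r ++ [l] else r) result) r
    = r ++ cs.filter gnKeep := by
  induction cs generalizing r with
  | nil => simp
  | cons c cs ih =>
      rw [List.foldl_cons, gn_inner, ih, List.filter_cons]
      cases h : gnKeep c <;> simp [h]

-- ===== VERDICT (by name: the statement is the Claim_ definition above) =====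
theorem gn_spec : Claim_equal_gn := by
  intro text _
  show _ = _
  simp only [gn, gn_alt, gn_outer, List.nil_append]
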